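-- pv_equiv track=rewrite | github.com/cnkyrpsgl/leetcode | solutions/python3/1040.py | numMovesStonesII
-- ===== SOURCE A (Python) =====
-- from typing import List
--
-- def numMovesStonesII(A: List[int]) -> List[int]:
--     A.sort()
--     i, n, low = 0, len(A), len(A)
--     high = max(A[-1] - n + 2 - A[1], A[-2] - A[0] - n + 2)
--     for j in range(n):
--         while A[j] - A[i] >= n: i += 1
--         if j - i + 1 == n - 1 and A[j] - A[i] == n - 2:
--             low = min(low, 2)
--         else:
--             low = min(low, n - (j - i + 1))
--     return [low, high]
-- ===== SOURCE B (Python) =====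
-- from typing import List
--
-- def numMovesStonesII(A: List[int]) -> List[int]:
--     A.sort()
--     n = len(A)
--     high = max(A[-1] - n + 2 - A[1], A[-2] - A[0] - n + 2)
--     best = n
--     for j in range(n):
--         x = A[j] - n + 1
--         lo, hi = 0, n
--         while lo < hi:
--             mid = (lo + hi) // 2
--             if A[mid] < x:
--                 lo = mid + 1
--             else:
--                 hi = mid
--         c = j - lo + 1
--         if c == n - 1 and A[j] - A[lo] == n - 2:
--             best = min(best, 2)
--         else:
--             best = min(best, n - c)
--     return [best, high]
-- ===== Notes on version B (the rewrite author's own statement) =====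
-- stated objective: alternative
-- what changed: The sliding-window left pointer (A's amortized two-pointer while-loop over the sorted array) is replaced by an independent hand-written bisect_left binary search per right endpoint j; the sort, the 'high' closed form and the scoring branch are unchanged.
import Mathlib
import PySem

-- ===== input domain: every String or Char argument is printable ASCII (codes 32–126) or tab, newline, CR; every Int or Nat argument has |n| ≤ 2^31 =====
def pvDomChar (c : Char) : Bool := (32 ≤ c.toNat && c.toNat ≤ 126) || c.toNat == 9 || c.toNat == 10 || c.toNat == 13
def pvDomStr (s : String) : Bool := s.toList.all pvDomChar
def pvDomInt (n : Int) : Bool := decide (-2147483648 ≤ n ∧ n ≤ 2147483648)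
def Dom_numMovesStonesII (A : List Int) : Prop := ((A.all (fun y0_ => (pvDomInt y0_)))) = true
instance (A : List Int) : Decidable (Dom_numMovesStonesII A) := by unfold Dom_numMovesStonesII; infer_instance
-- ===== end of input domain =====

-- B replaces A's amortized two-pointer inner while-loop by a hand-written bisect_left binary
-- search per right endpoint (objective: alternative, similar cost). Both Pythons sort A in place;
-- the equivalence proved here is about the return value.

-- ===== PORT A =====
-- inner 'while A[j] - A[i] >= n: i += 1'; fuel S.length only makes it total (never exhausted: i stops at j)
def pvAdv (S : List Int) (n j : Int) : Int → Nat → Int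
  | i, 0 => i
  | i, f+1 =>
    match PySem.List.pyGet? S j, PySem.List.pyGet? S i with
    | some aj, some ai => if aj - ai ≥ n then pvAdv S n j (i+1) f else i
    | _, _ => i

-- loop body of A's 'for j in range(n)'; state = (i, low)
def pvBodyA (S : List Int) (n : Int) (st : Int × Int) (j : Int) : Int × Int :=
  let i := pvAdv S n j st.1 S.length
  match PySem.List.pyGet? S j, PySem.List.pyGet? S i with
  | some aj, some ai =>
    if j - i + 1 = n - 1 ∧ aj - ai = n - 2 then (i, min st.2 2)
    else (i, min st.2 (n - (j - i + 1)))
  | _, _ => (i, st.2)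

def numMovesStonesII (A : List Int) : List Int :=
  let S := PySem.List.sorted A (fun x => x) false
  let n : Int := PySem.List.len S
  let low : Int := n
  match PySem.List.pyGet? S (-1), PySem.List.pyGet? S 1, PySem.List.pyGet? S (-2), PySem.List.pyGet? S 0 with
  | some aL, some a1, some aL2, some a0 =>
    let high := max (aL - n + 2 - a1) (aL2 - a0 - n + 2)
    let st := (PySem.List.pyRange 0 n 1).foldl (pvBodyA S n) (0, low)
    [st.2, high]
  | _, _, _, _ => []   -- IndexError path (len(A) < 2); excluded by Pre_

-- ===== PORT B =====
-- Source B's hand-written bisect_left loop 'while lo < hi: …'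
def pvBis (S : List Int) (x : Int) (lo hi : Int) : Int :=
  if h : lo < hi then
    let mid := PySem.Int.floordiv (lo + hi) 2
    match PySem.List.pyGet? S mid with
    | some v => if v < x then pvBis S x (mid + 1) hi else pvBis S x lo mid
    | none => lo   -- IndexError path; unreachable for 0 ≤ lo < hi ≤ len(S)
  else lo
termination_by (hi - lo).toNat
decreasing_by
  · have h1 := PySem.Int.floordiv_two_mid_bounds (le_of_lt h)
    have h2 : PySem.Int.floordiv (lo + hi) 2 < hi := by
      rw [PySem.Int.floordiv_lt_iff_lt_mul (by omega)]; omega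
    omega
  · have h1 := PySem.Int.floordiv_two_mid_bounds (le_of_lt h)
    have h2 : PySem.Int.floordiv (lo + hi) 2 < hi := by
      rw [PySem.Int.floordiv_lt_iff_lt_mul (by omega)]; omega
    omega

-- loop body of B's 'for j in range(n)'; state = best
def pvBodyB (S : List Int) (n : Int) (best j : Int) : Int :=
  match PySem.List.pyGet? S j with
  | some aj =>
    let x := aj - n + 1
    let lo := pvBis S x 0 n
    match PySem.List.pyGet? S lo with
    | some alo =>
      let c := j - lo + 1
      if c = n - 1 ∧ aj - alo = n - 2 then min best 2 else min best (n - c)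
    | none => best
  | none => best

def numMovesStonesII_alt (A : List Int) : List Int :=
  let S := PySem.List.sorted A (fun x => x) false
  let n : Int := PySem.List.len S
  match PySem.List.pyGet? S (-1), PySem.List.pyGet? S 1, PySem.List.pyGet? S (-2), PySem.List.pyGet? S 0 with
  | some aL, some a1, some aL2, some a0 =>
    let high := max (aL - n + 2 - a1) (aL2 - a0 - n + 2)
    let best := (PySem.List.pyRange 0 n 1).foldl (pvBodyB S n) n
    [best, high]
  | _, _, _, _ => []   -- IndexError path (len(A) < 2); excluded by Pre_

-- ===== PRECONDITION & SPEC =====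
-- A raises IndexError (on A[1] / A[-2]) when len(A) < 2; exactly those inputs are excluded.
def Pre_numMovesStonesII (A : List Int) : Prop := 2 ≤ A.length
instance (A : List Int) : Decidable (Pre_numMovesStonesII A) := by unfold Pre_numMovesStonesII; infer_instance
def pvWitness_numMovesStonesII : List Int := [2, 6, 5]

def Spec_numMovesStonesII (A : List Int) (out : List Int) : Prop := out = numMovesStonesII_alt A
instance (A : List Int) (out : List Int) : Decidable (Spec_numMovesStonesII A out) := by unfold Spec_numMovesStonesII; infer_instance

-- ===== CLAIM (what is proved, stated in full; the proofs are below) =====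
def Claim_equal_numMovesStonesII : Prop := ∀ (A : List Int), Dom_numMovesStonesII A → Pre_numMovesStonesII A → Spec_numMovesStonesII A (numMovesStonesII A)

-- ===== LEMMAS AND PROOFS =====

-- in a sorted list, S[k] < t iff k is below the count of elements < t
lemma pv_countP_char {S : List Int} (hs : S.Pairwise (· ≤ ·)) (t : Int) :
    ∀ {k : Nat} (hk : k < S.length), (S[k] < t ↔ k < S.countP (fun v => decide (v < t))) := by
  induction S with
  | nil => intro k hk; simp at hk
  | cons a tl ih =>
    rcases List.pairwise_cons.1 hs with ⟨ha, htl⟩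
    intro k hk
    rw [List.countP_cons]
    by_cases hat : a < t
    · cases k with
      | zero => simp [hat]
      | succ m =>
        simp only [List.getElem_cons_succ]
        have := ih htl (k := m) (by simpa using hk)
        simp [hat]
        omega
    · have h0 : tl.countP (fun v => decide (v < t)) = 0 := by
        rw [List.countP_eq_zero]
        intro x hx
        simp only [decide_eq_true_eq]
        have := ha x hx; omega
      cases k with
      | zero => simp [hat, h0]
      | succ m =>
        simp only [List.getElem_cons_succ]
        have hm : m < tl.length := by simpa using hk
        have := ha tl[m] (List.getElem_mem hm)
        simp [hat, h0]
        omega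

lemma pv_countP_le {S : List Int} (hs : S.Pairwise (· ≤ ·)) {j : Nat} (hj : j < S.length) (t : Int)
    (ht : ¬ S[j] < t) : S.countP (fun v => decide (v < t)) ≤ j := by
  by_contra hc
  exact ht ((pv_countP_char hs t hj).2 (by omega))

lemma pv_countP_mono {S : List Int} {t t' : Int} (h : t ≤ t') :
    S.countP (fun v => decide (v < t)) ≤ S.countP (fun v => decide (v < t')) := by
  apply List.countP_mono_left
  intro x _ hx
  simp only [decide_eq_true_eq] at *
  omega

-- B's binary search computes the count of elements < x
lemma pvBis_eq {S : List Int} (hs : S.Pairwise (· ≤ ·)) (x : Int) :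
    ∀ (lo hi : Int), 0 ≤ lo → hi ≤ (S.length : Int) →
      lo ≤ (S.countP (fun v => decide (v < x)) : Int) →
      (S.countP (fun v => decide (v < x)) : Int) ≤ hi →
      pvBis S x lo hi = (S.countP (fun v => decide (v < x)) : Int) := by
  intro lo hi
  generalize hd : (hi - lo).toNat = d
  induction d using Nat.strong_induction_on generalizing lo hi with
  | h d ih =>
    intro hlo hhi h1 h2
    rw [pvBis]
    split
    · next hlt =>
      have hm := PySem.Int.floordiv_two_mid_bounds (le_of_lt hlt)
      have hmlt : PySem.Int.floordiv (lo + hi) 2 < hi := by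
        rw [PySem.Int.floordiv_lt_iff_lt_mul (by omega)]; omega
      set mid := PySem.Int.floordiv (lo + hi) 2 with hmid
      have hmn : mid.toNat < S.length := by omega
      have hget : PySem.List.pyGet? S mid = some S[mid.toNat] :=
        PySem.List.pyGet?_eq_some_getElem S (by omega) (by omega)
      simp only [hget]
      have hchar := pv_countP_char hs x hmn
      split
      · next hvx =>
        have : (mid.toNat : Int) < (S.countP (fun v => decide (v < x)) : Int) := by
          exact_mod_cast hchar.1 hvx
        exact ih ((hi - (mid+1)).toNat) (by omega) (mid+1) hi rfl (by omega) hhi (by omega) h2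
      · next hvx =>
        have : (S.countP (fun v => decide (v < x)) : Int) ≤ (mid.toNat : Int) := by
          have : ¬ mid.toNat < S.countP (fun v => decide (v < x)) := fun h => hvx (hchar.2 h)
          exact_mod_cast Nat.le_of_not_lt this
        exact ih ((mid - lo).toNat) (by omega) lo mid rfl hlo (by omega) h1 (by omega)
    · next hlt => omega

-- A's advanced pointer computes the same count
lemma pvAdv_eq {S : List Int} (hs : S.Pairwise (· ≤ ·)) {n : Int} (hn : n = (S.length : Int))
    {j : Nat} (hj : j < S.length) :
    ∀ (f : Nat) (i : Int), 0 ≤ i →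
      i ≤ (S.countP (fun v => decide (v < S[j] - n + 1)) : Int) →
      ((S.countP (fun v => decide (v < S[j] - n + 1)) : Int) - i ≤ (f : Int)) →
      pvAdv S n (j : Int) i f = (S.countP (fun v => decide (v < S[j] - n + 1)) : Int) := by
  have hcj : S.countP (fun v => decide (v < S[j] - n + 1)) ≤ j := by
    apply pv_countP_le hs hj
    omega
  intro f
  induction f with
  | zero =>
    intro i h0 h1 h2
    simp only [pvAdv]
    omega
  | succ f ih =>
    intro i h0 h1 h2
    simp only [pvAdv]
    have hgj : PySem.List.pyGet? S (j : Int) = some S[j] := by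
      have := PySem.List.pyGet?_eq_some_getElem S (i := (j : Int)) (by omega) (by omega)
      simpa using this
    have hgi : PySem.List.pyGet? S i = some S[i.toNat] :=
      PySem.List.pyGet?_eq_some_getElem S (by omega) (by omega)
    simp only [hgj, hgi]
    have hchar := pv_countP_char hs (S[j] - n + 1) (k := i.toNat) (by omega)
    by_cases hlt : i < (S.countP (fun v => decide (v < S[j] - n + 1)) : Int)
    · have hcond : S[j] - S[i.toNat] ≥ n := by
        have : S[i.toNat] < S[j] - n + 1 := hchar.2 (by omega)
        omega
      rw [if_pos hcond]
      exact ih (i+1) (by omega) (by omega) (by omega)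
    · have hieq : i = (S.countP (fun v => decide (v < S[j] - n + 1)) : Int) := by omega
      have hcond : ¬ S[j] - S[i.toNat] ≥ n := by
        have : ¬ S[i.toNat] < S[j] - n + 1 := by
          intro hx
          have := hchar.1 hx
          omega
        omega
      rw [if_neg hcond]
      omega

-- one iteration: A's body threads i to the count, B's body finds the same count by binary search
lemma pv_body_step {S : List Int} (hs : S.Pairwise (· ≤ ·)) {n : Int} (hn : n = (S.length : Int))
    {j : Nat} (hj : j < S.length) {i low : Int} (h0 : 0 ≤ i)
    (h1 : i ≤ (S.countP (fun v => decide (v < S[j] - n + 1)) : Int)) :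
    pvBodyA S n (i, low) (j : Int)
      = ((S.countP (fun v => decide (v < S[j] - n + 1)) : Int), pvBodyB S n low (j : Int)) := by
  have hcl : S.countP (fun v => decide (v < S[j] - n + 1)) ≤ S.length :=
    List.countP_le_length
  have hcj : S.countP (fun v => decide (v < S[j] - n + 1)) ≤ j :=
    pv_countP_le hs hj _ (by omega)
  have hadv : pvAdv S n (j : Int) i S.length
      = (S.countP (fun v => decide (v < S[j] - n + 1)) : Int) :=
    pvAdv_eq hs hn hj S.length i h0 h1 (by omega)
  have hbis : pvBis S (S[j] - n + 1) 0 n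
      = (S.countP (fun v => decide (v < S[j] - n + 1)) : Int) :=
    pvBis_eq hs _ 0 n (by omega) (by omega) (by omega) (by omega)
  have hgj : PySem.List.pyGet? S (j : Int) = some S[j] := by
    have := PySem.List.pyGet?_eq_some_getElem S (i := (j : Int)) (by omega) (by omega)
    simpa using this
  have hgc : PySem.List.pyGet? S ((S.countP (fun v => decide (v < S[j] - n + 1)) : Nat) : Int)
      = some S[(S.countP (fun v => decide (v < S[j] - n + 1)))] := by
    have := PySem.List.pyGet?_eq_some_getElem S
      (i := ((S.countP (fun v => decide (v < S[j] - n + 1)) : Nat) : Int)) (by omega) (by omega)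
    simpa using this
  simp only [pvBodyA, pvBodyB, hadv, hbis, hgj, hgc]
  by_cases hcond : (j : Int) - (S.countP (fun v => decide (v < S[j] - n + 1)) : Int) + 1 = n - 1
      ∧ S[j] - S[(S.countP (fun v => decide (v < S[j] - n + 1)))] = n - 2
  · rw [if_pos hcond, if_pos hcond]
  · rw [if_neg hcond, if_neg hcond]

lemma pv_sorted_getElem_mono {S : List Int} (hs : S.Pairwise (· ≤ ·)) {p q : Nat}
    (hpq : p ≤ q) (hq : q < S.length) : S[p]'(by omega) ≤ S[q] := by
  rcases Nat.eq_or_lt_of_le hpq with h | h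
  · subst h; exact le_refl _
  · exact List.pairwise_iff_getElem.1 hs p q (by omega) hq h

-- the two loops agree (A's state i carries the invariant i ≤ count at the next j)
lemma pv_loop_eq {S : List Int} (hs : S.Pairwise (· ≤ ·)) {n : Int} (hn : n = (S.length : Int)) :
    ∀ (m j0 : Nat), j0 + m = S.length → ∀ (i low : Int), 0 ≤ i →
      (∀ hj : j0 < S.length, i ≤ (S.countP (fun v => decide (v < S[j0] - n + 1)) : Int)) →
      ((List.range' j0 m).foldl (fun st (j : Nat) => pvBodyA S n st (j : Int)) (i, low)).2
        = (List.range' j0 m).foldl (fun b (j : Nat) => pvBodyB S n b (j : Int)) low := by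
  intro m
  induction m with
  | zero => intro j0 _ i low _ _; simp
  | succ m ih =>
    intro j0 hlen i low h0 hinv
    have hj0 : j0 < S.length := by omega
    rw [List.range'_succ, List.foldl_cons, List.foldl_cons,
        pv_body_step hs hn hj0 h0 (hinv hj0)]
    apply ih (j0 + 1) (by omega) _ _ (by omega)
    intro hj1
    have hmono : S[j0] - n + 1 ≤ S[j0 + 1] - n + 1 := by
      have := pv_sorted_getElem_mono hs (p := j0) (q := j0 + 1) (by omega) hj1
      omega
    exact_mod_cast pv_countP_mono (S := S) hmono

-- ===== VERDICT (by name: the statement is the Claim_ definition above) =====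
theorem numMovesStonesII_spec : Claim_equal_numMovesStonesII := by
  intro A _hdom hpre
  unfold Spec_numMovesStonesII
  have hs : (PySem.List.sorted A (fun x => x) false).Pairwise (· ≤ ·) :=
    PySem.List.sorted_pairwise A (fun x => x)
  simp only [numMovesStonesII, numMovesStonesII_alt, PySem.List.len_eq]
  set S := PySem.List.sorted A (fun x => x) false with hS
  cases hg1 : PySem.List.pyGet? S (-1) <;>
    cases hg2 : PySem.List.pyGet? S 1 <;>
      cases hg3 : PySem.List.pyGet? S (-2) <;>
        cases hg4 : PySem.List.pyGet? S 0 <;> simp only []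
  congr 1
  rw [PySem.List.pyRange_zero_natCast, List.foldl_map, List.foldl_map,
      List.range_eq_range']
  exact pv_loop_eq hs rfl S.length 0 (by omega) 0 _ (by omega) (fun _ => by positivity)
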